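-- pv_equiv track=rewrite | github.com/VictorStankov/Advent_Of_Code | 2025/Day 6/Python/task_2.py | solution
-- ===== SOURCE A (Python) =====
-- from math import prod
--
-- operator_map = {
--     '+': sum,
--     '*': prod,
-- }
--
-- def solution(data):
--     items_in_col = len(data) - 1
--
--     result = 0
--     nums = []
--
--     for i in range(len(data[0]) - 1, -1, -1):
--         num = ''
--         for j in range(items_in_col):
--             num += data[j][i]
--
--         if not num.strip():
--             continue
--
--         nums.append(int(num))
--
--         operator = data[items_in_col][i]
--         if operator.strip():
--             result += operator_map[operator](nums)
--             nums.clear()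
--
--     return result
-- ===== SOURCE B (Python) =====
-- from math import prod
--
-- operator_map = {
--     '+': sum,
--     '*': prod,
-- }
--
-- def _reduce(group, pairs):
--     if not pairs:
--         return 0
--     (n, op), rest = pairs[0], pairs[1:]
--     group = group + [n]
--     if op.strip():
--         return operator_map[op](group) + _reduce([], rest)
--     return _reduce(group, rest)
--
-- def solution(data):
--     *rows, ops = data
--     pairs = [(int(''.join(r[i] for r in rows)), ops[i])
--              for i in range(len(data[0]) - 1, -1, -1)
--              if ''.join(r[i] for r in rows).strip()]
--     return _reduce([], pairs)
-- ===== Notes on version B (the rewrite author's own statement) =====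
-- stated objective: alternative
-- what changed: A interleaves parsing and evaluation in one right-to-left scan with a mutable accumulator that is applied and cleared whenever an operator cell is non-blank; B first parses all non-blank columns into a list of (number, operator-cell) pairs and then reduces that list by a separate recursive grouping pass (trailing operator-less numbers fall out naturally).
import Mathlib
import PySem

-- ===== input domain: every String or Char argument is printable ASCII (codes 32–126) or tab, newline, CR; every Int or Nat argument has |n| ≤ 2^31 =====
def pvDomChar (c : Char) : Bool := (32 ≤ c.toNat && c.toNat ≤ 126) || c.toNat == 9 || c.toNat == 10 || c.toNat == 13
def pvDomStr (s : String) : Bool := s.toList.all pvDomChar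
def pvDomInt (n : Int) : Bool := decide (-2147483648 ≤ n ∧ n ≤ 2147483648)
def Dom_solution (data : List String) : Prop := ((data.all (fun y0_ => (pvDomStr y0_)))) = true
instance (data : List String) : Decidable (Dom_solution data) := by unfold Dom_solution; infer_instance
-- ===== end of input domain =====

-- B replaces A's interleaved accumulate-and-apply scan by a parse-then-group pass: it first
-- collects (number, operator-cell) pairs for the non-blank columns, then reduces them
-- recursively; same behaviour, same asymptotic cost (objective: alternative).

-- operator_map applied to a list: '+' is sum, '*' is prod (any other key is outside Pre_).
def pvApplyOp (op : Char) (ns : List Int) : Int :=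
  if op = '+' then ns.sum else if op = '*' then ns.prod else 0

-- ===== PORT A =====
def solution (data : List String) : Int :=
  let itemsInCol : Int := (data.length : Int) - 1
  ((PySem.List.pyRange (PySem.Str.len (PySem.List.pyGetD data 0 "") - 1) (-1) (-1)).foldl
    (fun (st : Int × List Int) i =>
      let num : List Char :=
        (PySem.List.pyRange 0 itemsInCol 1).foldl
          (fun s j => s ++ [(PySem.Str.pyGet? (PySem.List.pyGetD data j "") i).getD ' ']) []
      if PySem.Chars.strip num = [] then st
      else
        let nums := st.2 ++ [(PySem.Int.ofChars? num).getD 0]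
        let op := (PySem.Str.pyGet? (PySem.List.pyGetD data itemsInCol "") i).getD ' '
        if PySem.Chars.strip [op] = [] then (st.1, nums)
        else (st.1 + pvApplyOp op nums, []))
    ((0 : Int), ([] : List Int))).1

-- ===== PORT B =====
-- _reduce(group, pairs) from Source B
def pvReduce (group : List Int) (pairs : List (Int × Char)) : Int :=
  match pairs with
  | [] => 0
  | (n, op) :: rest =>
    let group' := group ++ [n]
    if PySem.Chars.strip [op] ≠ [] then pvApplyOp op group' + pvReduce [] rest
    else pvReduce group' rest

def solution_alt (data : List String) : Int :=
  let rows := data.dropLast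
  let ops := (data.getLast?).getD ""
  let pairs : List (Int × Char) :=
    ((PySem.List.pyRange (PySem.Str.len (PySem.List.pyGetD data 0 "") - 1) (-1) (-1)).filter
      (fun i => !(PySem.Chars.strip (rows.map (fun r => (PySem.Str.pyGet? r i).getD ' '))).isEmpty)).map
      (fun i => ((PySem.Int.ofChars? (rows.map (fun r => (PySem.Str.pyGet? r i).getD ' '))).getD 0,
                 (PySem.Str.pyGet? ops i).getD ' '))
  pvReduce [] pairs

-- ===== PRECONDITION & SPEC =====
-- Pre_ = exactly where the Python A returns: data non-empty, every non-last row at least as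
-- wide as the first row (else IndexError), and every non-blank column parses as an int
-- (else ValueError) with its operator cell readable and, when non-blank, '+' or '*' (else
-- IndexError / KeyError).
def Pre_solution (data : List String) : Prop :=
  data ≠ [] ∧
  (∀ r ∈ data.dropLast, (PySem.List.pyGetD data 0 "").toList.length ≤ r.toList.length) ∧
  ∀ i < (PySem.List.pyGetD data 0 "").toList.length,
    PySem.Chars.strip (data.dropLast.map (fun r => r.toList.getD i ' ')) ≠ [] →
      (PySem.Int.ofChars? (data.dropLast.map (fun r => r.toList.getD i ' '))).isSome = true ∧
      i < ((data.getLast?).getD "").toList.length ∧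
      (PySem.Chars.strip [((data.getLast?).getD "").toList.getD i ' '] ≠ [] →
        ((data.getLast?).getD "").toList.getD i ' ' = '+' ∨
        ((data.getLast?).getD "").toList.getD i ' ' = '*')

instance (data : List String) : Decidable (Pre_solution data) := by
  unfold Pre_solution; infer_instance

def pvWitness_solution : List String := ["1 2", "3 4", "+ *"]

def Spec_solution (data : List String) (out : Int) : Prop := out = solution_alt data
instance (data : List String) (out : Int) : Decidable (Spec_solution data out) := by unfold Spec_solution; infer_instance

-- ===== CLAIM (what is proved, stated in full; the proofs are below) =====
def Claim_equal_solution : Prop := ∀ (data : List String), Dom_solution data → Pre_solution data → Spec_solution data (solution data)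

-- ===== LEMMAS AND PROOFS =====

theorem pv_last_eq (data : List String) :
    PySem.List.pyGetD data ((data.length : Int) - 1) "" = (data.getLast?).getD "" := by
  cases data with
  | nil => simp [PySem.List.pyGetD, PySem.List.pyGet?, PySem.List.pyIdx?]
  | cons a t =>
    rw [PySem.List.pyGetD_eq_getElem _ _ (by simp) (by simp)]
    rw [List.getLast?_eq_getElem?, List.getElem?_eq_getElem (by simp)]
    simp only [Option.getD_some]
    congr 1
    simp

theorem pv_col_eq (data : List String) (i : Int) :
    (PySem.List.pyRange 0 ((data.length : Int) - 1) 1).foldl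
      (fun s j => s ++ [(PySem.Str.pyGet? (PySem.List.pyGetD data j "") i).getD ' ']) [] =
    data.dropLast.map (fun r => (PySem.Str.pyGet? r i).getD ' ') := by
  rw [PySem.List.foldl_append_singleton_eq_map, List.nil_append]
  cases data with
  | nil =>
      rw [show ((([] : List String).length : Int) - 1) = -1 by simp]
      simp [PySem.List.pyRange_one_eq_nil (by omega : (-1 : Int) ≤ 0)]
  | cons a t =>
    have hlen : ((a :: t).length : Int) - 1 = ((a :: t).dropLast.length : Int) := by
      simp [List.length_dropLast]
    rw [hlen]
    calc (PySem.List.pyRange 0 ((a :: t).dropLast.length : Int) 1).map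
            (fun j => (PySem.Str.pyGet? (PySem.List.pyGetD (a :: t) j "") i).getD ' ')
        = (PySem.List.pyRange 0 ((a :: t).dropLast.length : Int) 1).map
            (fun j => (PySem.Str.pyGet? (PySem.List.pyGetD (a :: t).dropLast j "") i).getD ' ') := by
          apply List.map_congr_left
          intro j hj
          rw [PySem.List.mem_pyRange_one] at hj
          rw [PySem.List.pyGetD_eq_getElem _ _ hj.1 (by omega),
              PySem.List.pyGetD_eq_getElem _ _ hj.1
                (by simp only [List.length_dropLast] at hj ⊢; omega)]
          rw [List.getElem_dropLast]
      _ = ((PySem.List.pyRange 0 ((a :: t).dropLast.length : Int) 1).map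
            (fun j => PySem.List.pyGetD (a :: t).dropLast j "")).map
            (fun r => (PySem.Str.pyGet? r i).getD ' ') := by rw [List.map_map]; rfl
      _ = (a :: t).dropLast.map (fun r => (PySem.Str.pyGet? r i).getD ' ') := by
          rw [PySem.List.map_pyGetD_pyRange_zero']

theorem pv_fold_skip_filter_map {α β γ : Type} (l : List α) (col : α → List Char)
    (g : α → β) (f2 : γ → β → γ) (init : γ) :
    l.foldl (fun st x => if PySem.Chars.strip (col x) = [] then st else f2 st (g x)) init =
    ((l.filter (fun x => !(PySem.Chars.strip (col x)).isEmpty)).map g).foldl f2 init := by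
  rw [List.foldl_map, ← PySem.List.foldl_if_eq_foldl_filter]
  apply PySem.List.foldl_congr_mem
  intro acc x _
  by_cases h : PySem.Chars.strip (col x) = [] <;> simp [h]

theorem pv_fold_reduce (ps : List (Int × Char)) (r : Int) (g : List Int) :
    (ps.foldl
      (fun (st : Int × List Int) (p : Int × Char) =>
        if PySem.Chars.strip [p.2] = [] then (st.1, st.2 ++ [p.1])
        else (st.1 + pvApplyOp p.2 (st.2 ++ [p.1]), [])) (r, g)).1 =
    r + pvReduce g ps := by
  induction ps generalizing r g with
  | nil => simp [pvReduce]
  | cons p rest ih =>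
    obtain ⟨n, op⟩ := p
    by_cases h : PySem.Chars.strip [op] = []
    · simp [List.foldl_cons, h, pvReduce, ih]
    · simp [List.foldl_cons, h, pvReduce, ih]
      ring

-- ===== VERDICT (by name: the statement is the Claim_ definition above) =====
theorem solution_spec : Claim_equal_solution := by
  intro data _ _
  unfold Spec_solution
  simp only [solution, solution_alt]
  simp only [pv_col_eq, pv_last_eq]
  rw [pv_fold_skip_filter_map _
      (fun i => data.dropLast.map fun r => (PySem.Str.pyGet? r i).getD ' ')
      (fun i => ((PySem.Int.ofChars? (data.dropLast.map fun r => (PySem.Str.pyGet? r i).getD ' ')).getD 0,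
                 (PySem.Str.pyGet? ((data.getLast?).getD "") i).getD ' '))
      (fun (st : Int × List Int) (p : Int × Char) =>
        if PySem.Chars.strip [p.2] = [] then (st.1, st.2 ++ [p.1])
        else (st.1 + pvApplyOp p.2 (st.2 ++ [p.1]), []))]
  rw [pv_fold_reduce, zero_add]
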